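-- pv_equiv track=rewrite | github.com/raeez/chiral-bar-cobar | compute/lib/virasoro_bar.py | bar_chain_dim
-- ===== SOURCE A (Python) =====
-- from math import factorial
-- from typing import Dict, List, Tuple
--
-- def partitions_geq2(h: int) -> int:
--     """Number of partitions of h into parts >= 2.
--
--     p_{>=2}(h) = p(h) - p(h-1) where p = unrestricted partition function.
--
--     Ground truth: comp:virasoro-vacuum.
--     Values: h=2:1, 3:1, 4:2, 5:2, 6:4, 7:4, 8:7, 9:8, 10:12, 11:14, 12:21
--     """
--     if h < 0:
--         return 0
--     if h == 0:
--         return 1  # empty partition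
--     if h == 1:
--         return 0  # no partition of 1 into parts >= 2
--
--     dp = [0] * (h + 1)
--     dp[0] = 1
--     for part in range(2, h + 1):
--         for j in range(part, h + 1):
--             dp[j] += dp[j - part]
--     return dp[h]
--
-- def os_top_dim(n: int) -> int:
--     """Dimension of top-degree OS algebra on n points.
--
--     dim Omega^{n-1}(Conf_n(C)) = (n-1)!
--
--     Ground truth: comp:poincare-config.
--     """
--     if n <= 0:
--         return 0
--     return factorial(n - 1)
--
-- def bar_chain_dim(n: int, h: int) -> int:
--     """Dimension of B^n_h(Vir_c): bar degree n, conformal weight h.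
--
--     dim B^n_h = (sum_{a1+...+an=h, ai>=2} prod p_{>=2}(ai)) * (n-1)!
--
--     Ground truth: comp:virasoro-dim-table.
--     """
--     if n <= 0 or h < 2 * n:
--         return 0
--
--     form_dim = os_top_dim(n)
--     if form_dim == 0:
--         return 0
--
--     aug_dims = {w: partitions_geq2(w) for w in range(2, h - 2 * (n - 1) + 1)}
--     tensor_count = _tensor_product_dim(n, h, aug_dims)
--     return tensor_count * form_dim
--
-- def _tensor_product_dim(n: int, h: int, aug_dims: Dict[int, int]) -> int:
--     """Sum over compositions h = a1 + ... + an (ai >= 2) of prod p_{>=2}(ai)."""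
--     if n == 1:
--         return aug_dims.get(h, partitions_geq2(h))
--
--     total = 0
--     for a in range(2, h - 2 * (n - 1) + 1):
--         d_a = aug_dims.get(a, partitions_geq2(a))
--         if d_a == 0:
--             continue
--         rest = _tensor_product_dim(n - 1, h - a, aug_dims)
--         total += d_a * rest
--     return total
-- ===== SOURCE B (Python) =====
-- from math import factorial
--
-- def partitions_geq2(h: int) -> int:
--     """Number of partitions of h into parts >= 2 (p(h) - p(h-1))."""
--     if h < 0:
--         return 0
--     if h == 0:
--         return 1
--     if h == 1:
--         return 0
--     dp = [0] * (h + 1)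
--     dp[0] = 1
--     for part in range(2, h + 1):
--         for j in range(part, h + 1):
--             dp[j] += dp[j - part]
--     return dp[h]
--
-- def bar_chain_dim(n: int, h: int) -> int:
--     """dim B^n_h = (sum over compositions h = a1+...+an, ai>=2, of prod p_{>=2}(ai)) * (n-1)!
--
--     Bottom-up: iterated convolution over the bar degree (dp[w] = weighted
--     count of compositions of w into k parts, each >= 2) instead of
--     enumerating compositions by top-down recursion (a different, table-driven algorithm).
--     """
--     if n <= 0 or h < 2 * n:
--         return 0
--     p2 = [partitions_geq2(w) for w in range(h + 1)]
--     dp = [1] + [0] * h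
--     for _ in range(n):
--         dp = [sum(p2[a] * dp[w - a] for a in range(2, w + 1)) for w in range(h + 1)]
--     return dp[h] * factorial(n - 1)
-- ===== Notes on version B (the rewrite author's own statement) =====
-- stated objective: alternative
-- what changed: Replaces A's top-down recursion over compositions (with a dict of precomputed partition counts) by a bottom-up iterated-convolution DP over the bar degree, dp[w] = weighted count of compositions of w into k parts >= 2.
import Mathlib
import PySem

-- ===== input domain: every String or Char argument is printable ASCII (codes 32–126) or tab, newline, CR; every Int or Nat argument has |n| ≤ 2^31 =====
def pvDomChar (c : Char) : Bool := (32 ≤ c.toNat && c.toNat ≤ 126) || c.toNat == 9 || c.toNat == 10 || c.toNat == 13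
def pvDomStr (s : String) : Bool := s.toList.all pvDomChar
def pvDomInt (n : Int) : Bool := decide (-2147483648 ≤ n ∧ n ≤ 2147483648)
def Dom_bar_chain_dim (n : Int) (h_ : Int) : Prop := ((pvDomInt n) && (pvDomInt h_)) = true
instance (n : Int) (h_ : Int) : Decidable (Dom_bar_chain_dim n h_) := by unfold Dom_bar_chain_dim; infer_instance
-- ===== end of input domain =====

-- B replaces A's top-down recursion over compositions by a bottom-up
-- iterated-convolution DP over the bar degree (objective: alternative algorithm).

-- ===== PORT A =====

-- shared module helper (B's Python reuses it verbatim)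
def partitions_geq2 (h : Int) : Int :=
  if h < 0 then 0
  else if h = 0 then 1
  else if h = 1 then 0
  else
    let dp0 : List Int := PySem.List.pySetD (List.replicate (h + 1).toNat (0 : Int)) 0 1
    let dp := (PySem.List.pyRange 2 (h + 1) 1).foldl (fun dp part =>
        (PySem.List.pyRange part (h + 1) 1).foldl (fun dp j =>
            PySem.List.pySetD dp j
              (PySem.List.pyGetD dp j 0 + PySem.List.pyGetD dp (j - part) 0)) dp) dp0
    PySem.List.pyGetD dp h 0

def os_top_dim (n : Int) : Int :=
  if n ≤ 0 then 0 else ((n - 1).toNat.factorial : Int)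

-- _tensor_product_dim: Python recursion on n (n ≥ 1 at every call); fuel = n as a Nat
def tensor_product_dim : Nat → Int → PySem.Dict Int Int → Int
  | 0, _, _ => 0    -- unreachable: Python is only called with n ≥ 1
  | 1, h, aug => aug.getD h (partitions_geq2 h)
  | (k + 2), h, aug =>
      (PySem.List.pyRange 2 (h - 2 * ((k : Int) + 1) + 1) 1).foldl (fun total a =>
        let d_a := aug.getD a (partitions_geq2 a)
        if d_a = 0 then total
        else total + d_a * tensor_product_dim (k + 1) (h - a) aug) 0

def bar_chain_dim (n : Int) (h_ : Int) : Int :=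
  if n ≤ 0 ∨ h_ < 2 * n then 0
  else
    let form_dim := os_top_dim n
    if form_dim = 0 then 0
    else
      let aug := (PySem.List.pyRange 2 (h_ - 2 * (n - 1) + 1) 1).foldl
          (fun d w => d.insert w (partitions_geq2 w)) PySem.Dict.empty
      tensor_product_dim n.toNat h_ aug * form_dim

-- ===== PORT B =====

-- one convolution pass: dp'[w] = sum_{a=2..w} p2[a] * dp[w-a]
def conv_step (p2 dp : List Int) (h_ : Int) : List Int :=
  (PySem.List.pyRange 0 (h_ + 1) 1).map (fun w =>
    (PySem.List.pyRange 2 (w + 1) 1).foldl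
      (fun s a => s + PySem.List.pyGetD p2 a 0 * PySem.List.pyGetD dp (w - a) 0) 0)

def bar_chain_dim_alt (n : Int) (h_ : Int) : Int :=
  if n ≤ 0 ∨ h_ < 2 * n then 0
  else
    let p2 := (PySem.List.pyRange 0 (h_ + 1) 1).map partitions_geq2
    let dp := (PySem.List.pyRange 0 n 1).foldl (fun dp _ => conv_step p2 dp h_)
        ((1 : Int) :: List.replicate h_.toNat 0)
    PySem.List.pyGetD dp h_ 0 * ((n - 1).toNat.factorial : Int)

-- ===== PRECONDITION & SPEC =====
def Spec_bar_chain_dim (n : Int) (h_ : Int) (out : Int) : Prop := out = bar_chain_dim_alt n h_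
instance (n : Int) (h_ : Int) (out : Int) : Decidable (Spec_bar_chain_dim n h_ out) := by
  unfold Spec_bar_chain_dim; infer_instance

-- ===== CLAIM (what is proved, stated in full; the proofs are below) =====
def Claim_equal_bar_chain_dim : Prop :=
  ∀ (n : Int) (h_ : Int), Dom_bar_chain_dim n h_ → Spec_bar_chain_dim n h_ (bar_chain_dim n h_)

-- ===== LEMMAS AND PROOFS =====

-- math model of B's DP: C k w = weighted count of compositions of w into k parts ≥ 2
def Cdp : Nat → Int → Int
  | 0, w => if w = 0 then 1 else 0
  | (k + 1), w =>
      ((PySem.List.pyRange 2 (w + 1) 1).map (fun a => partitions_geq2 a * Cdp k (w - a))).sum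

-- math model of A's recursion (the dict removed)
def Tmod : Nat → Int → Int
  | 0, _ => 0
  | 1, h => partitions_geq2 h
  | (k + 2), h =>
      ((PySem.List.pyRange 2 (h - 2 * ((k : Int) + 1) + 1) 1).map
        (fun a => partitions_geq2 a * Tmod (k + 1) (h - a))).sum

-- A's dict always stores partitions_geq2 of its key, so getD with that default is the identity
theorem aug_getD_eq (l : List Int) (d : PySem.Dict Int Int)
    (hd : ∀ a, d.getD a (partitions_geq2 a) = partitions_geq2 a) :
    ∀ a, ((l.foldl (fun d w => d.insert w (partitions_geq2 w)) d).getD a (partitions_geq2 a))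
      = partitions_geq2 a := by
  induction l generalizing d with
  | nil => exact hd
  | cons w l ih =>
      intro a
      refine ih (d.insert w (partitions_geq2 w)) (fun a => ?_) a
      rw [PySem.Dict.getD_insert]
      split_ifs with hw
      · rw [hw]
      · exact hd a

theorem tensor_eq_Tmod (k : Nat) :
    ∀ (h : Int) (aug : PySem.Dict Int Int),
      (∀ a, aug.getD a (partitions_geq2 a) = partitions_geq2 a) →
      tensor_product_dim k h aug = Tmod k h := by
  induction k with
  | zero => intro h aug _; rfl
  | succ k ih =>
      intro h aug haug
      cases k with
      | zero => simpa [tensor_product_dim, Tmod] using haug h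
      | succ j =>
          show tensor_product_dim (j + 2) h aug = Tmod (j + 2) h
          unfold tensor_product_dim Tmod
          rw [PySem.List.foldl_congr_mem _ _
              (fun total a => total + partitions_geq2 a * Tmod (j + 1) (h - a)) _
              (by
                intro acc a _
                show (if aug.getD a (partitions_geq2 a) = 0 then acc
                      else acc + aug.getD a (partitions_geq2 a) *
                        tensor_product_dim (j + 1) (h - a) aug)
                    = acc + partitions_geq2 a * Tmod (j + 1) (h - a)
                rw [haug a, ih (h - a) aug haug]
                split_ifs with h0
                · rw [h0]; ring
                · rfl)]
          rw [PySem.List.foldl_add]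
          simp

-- B's initial list realises Cdp 0
theorem init_getD (h_ i : Int) (h0 : 0 ≤ i) :
    PySem.List.pyGetD ((1 : Int) :: List.replicate h_.toNat 0) i 0 = Cdp 0 i := by
  rcases Int.eq_ofNat_of_zero_le h0 with ⟨m, rfl⟩
  rw [PySem.List.pyGetD_natCast]
  cases m with
  | zero => rfl
  | succ m =>
      simp only [List.getD, List.getElem?_cons_succ, Cdp]
      rw [List.getElem?_replicate]
      have : ((m : Int) + 1 = 0) = False := by simp; omega
      split_ifs <;> simp_all

-- the p2 table realises partitions_geq2 on 0..h_
theorem p2_getD (h_ i : Int) (h0 : 0 ≤ i) (hi : i ≤ h_) :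
    PySem.List.pyGetD ((PySem.List.pyRange 0 (h_ + 1) 1).map partitions_geq2) i 0
      = partitions_geq2 i :=
  PySem.List.pyGetD_map_pyRange_of_nonneg _ _ _ _ h0 (by omega)

-- one convolution pass takes Cdp k to Cdp (k+1) on indices 0..h_
theorem conv_step_getD (h_ : Int) (p2 dp : List Int) (k : Nat)
    (hp2 : ∀ i, 0 ≤ i → i ≤ h_ → PySem.List.pyGetD p2 i 0 = partitions_geq2 i)
    (hdp : ∀ i, 0 ≤ i → i ≤ h_ → PySem.List.pyGetD dp i 0 = Cdp k i) :
    ∀ w, 0 ≤ w → w ≤ h_ →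
      PySem.List.pyGetD (conv_step p2 dp h_) w 0 = Cdp (k + 1) w := by
  intro w hw0 hwh
  unfold conv_step
  rw [PySem.List.pyGetD_map_pyRange_of_nonneg _ _ _ _ hw0 (by omega)]
  rw [PySem.List.foldl_congr_mem _ _
      (fun s a => s + partitions_geq2 a * Cdp k (w - a)) _
      (by
        intro acc a ha
        rw [PySem.List.mem_pyRange_one] at ha
        rw [hp2 a (by omega) (by omega), hdp (w - a) (by omega) (by omega)])]
  rw [PySem.List.foldl_add]
  simp [Cdp]

-- the whole DP loop: after the fold over l, index i holds Cdp (k + l.length)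
theorem dp_loop (h_ : Int) (p2 : List Int)
    (hp2 : ∀ i, 0 ≤ i → i ≤ h_ → PySem.List.pyGetD p2 i 0 = partitions_geq2 i)
    (l : List Int) :
    ∀ (dp : List Int) (k : Nat),
      (∀ i, 0 ≤ i → i ≤ h_ → PySem.List.pyGetD dp i 0 = Cdp k i) →
      ∀ i, 0 ≤ i → i ≤ h_ →
        PySem.List.pyGetD (l.foldl (fun dp _ => conv_step p2 dp h_) dp) i 0
          = Cdp (k + l.length) i := by
  induction l with
  | nil => intro dp k hdp i h0 hi; simpa using hdp i h0 hi
  | cons x l ih =>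
      intro dp k hdp i h0 hi
      have := ih (conv_step p2 dp h_) (k + 1) (conv_step_getD h_ p2 dp k hp2 hdp) i h0 hi
      simpa [Nat.add_assoc, Nat.add_comm 1 l.length] using this

-- Cdp k vanishes below weight 2k (k ≥ 1)
theorem Cdp_eq_zero (k : Nat) :
    ∀ h : Int, 1 ≤ k → h < 2 * (k : Int) → Cdp k h = 0 := by
  induction k with
  | zero => intro h h1 _; exact absurd h1 (by omega)
  | succ k ih =>
      intro h _ hh
      unfold Cdp
      by_cases h2 : h < 2
      · rw [PySem.List.pyRange_one_eq_nil (by omega)]; rfl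
      · have hk1 : 1 ≤ k := by omega
        apply List.sum_eq_zero
        intro x hx
        rcases List.mem_map.mp hx with ⟨a, ha, rfl⟩
        rw [PySem.List.mem_pyRange_one] at ha
        rw [ih (h - a) hk1 (by omega)]
        ring

-- A's composition sum equals B's convolution value (k ≥ 1, h ≥ 2)
theorem Tmod_eq_Cdp (k : Nat) :
    ∀ h : Int, 1 ≤ k → 2 ≤ h → Tmod k h = Cdp k h := by
  induction k with
  | zero => intro h h1 _; exact absurd h1 (by omega)
  | succ k ih =>
      intro h _ h2
      cases k with
      | zero =>
          show Tmod 1 h = Cdp 1 h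
          unfold Tmod Cdp
          rw [PySem.List.pyRange_one_append 2 h (h + 1) (by omega) (by omega),
              PySem.List.pyRange_one_singleton]
          rw [List.map_append, List.sum_append]
          have hz : ((PySem.List.pyRange 2 h 1).map
              (fun a => partitions_geq2 a * Cdp 0 (h - a))).sum = 0 := by
            apply List.sum_eq_zero
            intro x hx
            rcases List.mem_map.mp hx with ⟨a, ha, rfl⟩
            rw [PySem.List.mem_pyRange_one] at ha
            have : Cdp 0 (h - a) = 0 := by
              unfold Cdp; split_ifs with h0 <;> [omega; rfl]
            rw [this]; ring
          simp only [List.map_cons, List.map_nil, List.sum_cons, List.sum_nil, hz, sub_self]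
          simp [Cdp]
      | succ j =>
          show Tmod (j + 2) h = Cdp (j + 2) h
          unfold Tmod Cdp
          by_cases hbig : h < 2 * ((j : Int) + 2)
          · rw [PySem.List.pyRange_one_eq_nil (by omega)]
            have := Cdp_eq_zero (j + 2) h (by omega) (by omega)
            unfold Cdp at this
            simpa using this.symm
          · set m : Int := h - 2 * ((j : Int) + 1) + 1 with hm
            rw [PySem.List.pyRange_one_append 2 m (h + 1) (by omega) (by omega)]
            rw [List.map_append, List.sum_append]
            have hzero : ((PySem.List.pyRange m (h + 1) 1).map
                (fun a => partitions_geq2 a * Cdp (j + 1) (h - a))).sum = 0 := by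
              apply List.sum_eq_zero
              intro x hx
              rcases List.mem_map.mp hx with ⟨a, ha, rfl⟩
              rw [PySem.List.mem_pyRange_one] at ha
              rw [Cdp_eq_zero (j + 1) (h - a) (by omega) (by omega)]
              ring
            have hcongr : ((PySem.List.pyRange 2 m 1).map
                  (fun a => partitions_geq2 a * Tmod (j + 1) (h - a))).sum
                = ((PySem.List.pyRange 2 m 1).map
                  (fun a => partitions_geq2 a * Cdp (j + 1) (h - a))).sum := by
              congr 1
              apply List.map_congr_left
              intro a ha
              rw [PySem.List.mem_pyRange_one] at ha
              rw [ih (h - a) (by omega) (by omega)]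
            rw [hcongr, hzero]
            ring

-- ===== VERDICT (by name: the statement is the Claim_ definition above) =====
theorem bar_chain_dim_spec : Claim_equal_bar_chain_dim := by
  intro n h_ _
  unfold Spec_bar_chain_dim bar_chain_dim bar_chain_dim_alt
  by_cases hg : n ≤ 0 ∨ h_ < 2 * n
  · simp [hg]
  · simp only [hg, if_false]
    have hn : 0 < n := by omega
    have hh : 2 * n ≤ h_ := by omega
    have hform : os_top_dim n ≠ 0 := by
      unfold os_top_dim
      rw [if_neg (by omega)]
      exact_mod_cast Nat.factorial_ne_zero (n - 1).toNat
    rw [if_neg hform]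
    have haug : ∀ a, (((PySem.List.pyRange 2 (h_ - 2 * (n - 1) + 1) 1).foldl
        (fun d w => d.insert w (partitions_geq2 w)) PySem.Dict.empty).getD a
          (partitions_geq2 a)) = partitions_geq2 a := by
      apply aug_getD_eq
      intro a
      exact PySem.Dict.getD_empty a (partitions_geq2 a)
    rw [tensor_eq_Tmod n.toNat h_ _ haug]
    have hdp := dp_loop h_ _ (p2_getD h_) (PySem.List.pyRange 0 n 1)
        ((1 : Int) :: List.replicate h_.toNat 0) 0
        (fun i h0 _ => init_getD h_ i h0) h_ (by omega) le_rfl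
    rw [hdp]
    rw [PySem.List.length_pyRange_one]
    have hk1 : 1 ≤ (n - 0).toNat := by omega
    have h2 : 2 ≤ h_ := by omega
    have hnn : (n - 0).toNat = n.toNat := by omega
    rw [hnn] at hk1 ⊢
    rw [Tmod_eq_Cdp n.toNat h_ (by omega) h2]
    unfold os_top_dim
    rw [if_neg (by omega), Nat.zero_add]
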